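-- pv_equiv track=rewrite | github.com/VadPA/repo-github-python-dz | Lesson_4/task_4_3.py | my_gen_2
-- ===== SOURCE A (Python) =====
-- def my_gen_2(start, end):
--     i = start
--     while i <= end:
--         if i % 20 == 0 or i % 21 == 0:
--             yield i
--             i += 1
--         else:
--             i += 1
-- ===== SOURCE B (Python) =====
-- def my_gen_2(start, end):
--     # merge the two arithmetic progressions of multiples of 20 and 21,
--     # skipping one copy where they coincide (multiples of 420)
--     a = -(-start // 20) * 20   # first multiple of 20 >= start
--     b = -(-start // 21) * 21   # first multiple of 21 >= start
--     while a <= end or b <= end: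
--         if a < b:
--             yield a
--             a += 20
--         elif b < a:
--             yield b
--             b += 21
--         else:
--             yield a
--             a += 20
--             b += 21
-- ===== Notes on version B (the rewrite author's own statement) =====
-- stated objective: faster
-- what changed: Instead of testing every integer in [start, end] for divisibility, B jumps to the first multiples of 20 and 21 at or above start and merges the two arithmetic progressions in order, emitting a coincidence (multiple of 420) once.
import Mathlib
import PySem

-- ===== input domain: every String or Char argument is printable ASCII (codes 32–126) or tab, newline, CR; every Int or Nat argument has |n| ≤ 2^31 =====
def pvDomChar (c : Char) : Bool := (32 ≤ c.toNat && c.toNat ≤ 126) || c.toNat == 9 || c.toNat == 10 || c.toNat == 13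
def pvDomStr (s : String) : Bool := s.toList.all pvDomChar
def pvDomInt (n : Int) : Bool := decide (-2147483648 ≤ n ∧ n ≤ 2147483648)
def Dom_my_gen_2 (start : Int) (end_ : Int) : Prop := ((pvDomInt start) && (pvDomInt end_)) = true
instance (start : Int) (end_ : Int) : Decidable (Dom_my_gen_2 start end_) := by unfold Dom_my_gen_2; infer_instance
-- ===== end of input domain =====

-- B replaces the per-integer divisibility scan by an ordered merge of the two
-- arithmetic progressions of multiples of 20 and 21 (dedup at multiples of 420): asymptotically faster.


-- ===== PORT A =====
-- while i <= end: yield i if i % 20 == 0 or i % 21 == 0; i += 1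
-- (fuel = the number of remaining loop iterations, a pure totality guard)
def myGenA : Nat → Int → Int → List Int
  | 0, _, _ => []
  | f + 1, i, end_ =>
    if i ≤ end_ then
      if PySem.Int.mod i 20 = 0 ∨ PySem.Int.mod i 21 = 0 then
        i :: myGenA f (i + 1) end_
      else
        myGenA f (i + 1) end_
    else []

def my_gen_2 (start : Int) (end_ : Int) : List Int :=
  myGenA (end_ + 1 - start).toNat start end_

-- ===== PORT B =====
-- merge loop of Source B: a, b are the next unemitted multiples of 20 resp. 21
-- (fuel bounds the iteration count: each step strictly shrinks (end+20-a)+(end+21-b))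
def myGenB : Nat → Int → Int → Int → List Int
  | 0, _, _, _ => []
  | f + 1, a, b, end_ =>
    if a ≤ end_ ∨ b ≤ end_ then
      if a < b then a :: myGenB f (a + 20) b end_
      else if b < a then b :: myGenB f a (b + 21) end_
      else a :: myGenB f (a + 20) (b + 21) end_
    else []

def my_gen_2_alt (start : Int) (end_ : Int) : List Int :=
  myGenB ((end_ + 20 - -(PySem.Int.floordiv (-start) 20) * 20).toNat
            + (end_ + 21 - -(PySem.Int.floordiv (-start) 21) * 21).toNat)
    (-(PySem.Int.floordiv (-start) 20) * 20) (-(PySem.Int.floordiv (-start) 21) * 21) end_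

-- ===== PRECONDITION & SPEC =====
def Spec_my_gen_2 (start : Int) (end_ : Int) (out : List Int) : Prop := out = my_gen_2_alt start end_
instance (start : Int) (end_ : Int) (out : List Int) : Decidable (Spec_my_gen_2 start end_ out) := by unfold Spec_my_gen_2; infer_instance

-- ===== CLAIM (what is proved, stated in full; the proofs are below) =====
def Claim_equal_my_gen_2 : Prop := ∀ (start : Int) (end_ : Int), Dom_my_gen_2 start end_ → Spec_my_gen_2 start end_ (my_gen_2 start end_)

-- ===== LEMMAS AND PROOFS =====

-- pvCeil M i = the first multiple of M at or above i, as Source B computes it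
def pvCeil (M i : Int) : Int := -(PySem.Int.floordiv (-i) M) * M

theorem pvCeil_bounds (M i : Int) (hM : 0 < M) :
    i ≤ pvCeil M i ∧ pvCeil M i < i + M ∧ M ∣ pvCeil M i := by
  have h := (PySem.Int.neg_floordiv_neg_eq_iff_of_pos (a := i) (b := M)
    (q := -(PySem.Int.floordiv (-i) M)) hM).mp rfl
  refine ⟨?_, ?_, ?_⟩
  · unfold pvCeil; nlinarith [h.1, h.2]
  · unfold pvCeil; nlinarith [h.1, h.2]
  · unfold pvCeil; exact dvd_mul_left M _

theorem pvCeil_eq_of (M i c : Int) (hM : 0 < M) (h1 : i ≤ c) (h2 : c < i + M) (h3 : M ∣ c) :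
    pvCeil M i = c := by
  obtain ⟨hg, hl, hd⟩ := pvCeil_bounds M i hM
  obtain ⟨k, hk⟩ := hd; obtain ⟨j, hj⟩ := h3
  have hkj : k < j + 1 := by
    have h1 : M * k < M * (j + 1) := by nlinarith
    exact lt_of_mul_lt_mul_left h1 (le_of_lt hM)
  have hjk : j < k + 1 := by
    have h1 : M * j < M * (k + 1) := by nlinarith
    exact lt_of_mul_lt_mul_left h1 (le_of_lt hM)
  have : k = j := by omega
  rw [hk, hj, this]

theorem mod_dvd20 (i : Int) : PySem.Int.mod i 20 = 0 ↔ (20 : Int) ∣ i :=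
  PySem.Int.mod_eq_zero_iff_dvd i 20

theorem mod_dvd21 (i : Int) : PySem.Int.mod i 21 = 0 ↔ (21 : Int) ∣ i :=
  PySem.Int.mod_eq_zero_iff_dvd i 21

theorem myGenB_nil (g : Nat) (a b end_ : Int) (ha : ¬ a ≤ end_) (hb : ¬ b ≤ end_) :
    myGenB g a b end_ = [] := by
  cases g with
  | zero => rfl
  | succ f => rw [myGenB, if_neg (by omega)]

theorem gen_eq (f : Nat) : ∀ (g : Nat) (i end_ : Int),
    (end_ + 1 - i).toNat ≤ f →
    (end_ + 20 - pvCeil 20 i).toNat + (end_ + 21 - pvCeil 21 i).toNat ≤ g →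
    myGenA f i end_ = myGenB g (pvCeil 20 i) (pvCeil 21 i) end_ := by
  induction f with
  | zero =>
    intro g i end_ hf _
    obtain ⟨ha1, _, _⟩ := pvCeil_bounds 20 i (by norm_num)
    obtain ⟨hb1, _, _⟩ := pvCeil_bounds 21 i (by norm_num)
    have hie : ¬ i ≤ end_ := by omega
    rw [myGenA, myGenB_nil g _ _ end_ (by omega) (by omega)]
  | succ f ih =>
    intro g i end_ hf hg
    obtain ⟨ha1, ha2, ha3⟩ := pvCeil_bounds 20 i (by norm_num)
    obtain ⟨hb1, hb2, hb3⟩ := pvCeil_bounds 21 i (by norm_num)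
    by_cases h : i ≤ end_
    · -- the merge must have fuel left: end_ + 20 - pvCeil 20 i > 0
      obtain ⟨g', rfl⟩ : ∃ g', g = g' + 1 := ⟨g - 1, by omega⟩
      rw [myGenA, if_pos h]
      by_cases d20 : (20 : Int) ∣ i <;> by_cases d21 : (21 : Int) ∣ i
      · -- both divide: a = b = i, both sides emit i
        have hai : pvCeil 20 i = i := pvCeil_eq_of 20 i i (by norm_num) le_rfl (by omega) d20
        have hbi : pvCeil 21 i = i := pvCeil_eq_of 21 i i (by norm_num) le_rfl (by omega) d21
        have e1 : pvCeil 20 (i + 1) = i + 20 :=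
          pvCeil_eq_of 20 (i + 1) (i + 20) (by norm_num) (by omega) (by omega) (by omega)
        have e2 : pvCeil 21 (i + 1) = i + 21 :=
          pvCeil_eq_of 21 (i + 1) (i + 21) (by norm_num) (by omega) (by omega) (by omega)
        rw [if_pos (Or.inl ((mod_dvd20 i).mpr d20))]
        rw [hai, hbi, myGenB, if_pos (Or.inl h), if_neg (by omega), if_neg (by omega)]
        rw [ih g' (i + 1) end_ (by omega) (by rw [e1, e2]; omega), e1, e2]
      · -- only 20 divides: a = i < b, emit a
        have hai : pvCeil 20 i = i := pvCeil_eq_of 20 i i (by norm_num) le_rfl (by omega) d20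
        have hbne : pvCeil 21 i ≠ i := fun he => d21 (he ▸ hb3)
        have e1 : pvCeil 20 (i + 1) = i + 20 :=
          pvCeil_eq_of 20 (i + 1) (i + 20) (by norm_num) (by omega) (by omega) (by omega)
        have e2 : pvCeil 21 (i + 1) = pvCeil 21 i :=
          pvCeil_eq_of 21 (i + 1) (pvCeil 21 i) (by norm_num) (by omega) (by omega) hb3
        rw [if_pos (Or.inl ((mod_dvd20 i).mpr d20))]
        rw [hai, myGenB, if_pos (Or.inl h), if_pos (by omega)]
        rw [ih g' (i + 1) end_ (by omega) (by rw [e1, e2]; omega), e1, e2]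
      · -- only 21 divides: b = i < a, emit b
        have hbi : pvCeil 21 i = i := pvCeil_eq_of 21 i i (by norm_num) le_rfl (by omega) d21
        have hane : pvCeil 20 i ≠ i := fun he => d20 (he ▸ ha3)
        have e1 : pvCeil 20 (i + 1) = pvCeil 20 i :=
          pvCeil_eq_of 20 (i + 1) (pvCeil 20 i) (by norm_num) (by omega) (by omega) ha3
        have e2 : pvCeil 21 (i + 1) = i + 21 :=
          pvCeil_eq_of 21 (i + 1) (i + 21) (by norm_num) (by omega) (by omega) (by omega)
        rw [if_pos (Or.inr ((mod_dvd21 i).mpr d21))]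
        rw [hbi, myGenB, if_pos (Or.inr h), if_neg (by omega), if_pos (by omega)]
        rw [ih g' (i + 1) end_ (by omega) (by rw [e1, e2]; omega), e1, e2]
      · -- neither divides: A skips i, the merge state is unchanged
        have hane : pvCeil 20 i ≠ i := fun he => d20 (he ▸ ha3)
        have hbne : pvCeil 21 i ≠ i := fun he => d21 (he ▸ hb3)
        have e1 : pvCeil 20 (i + 1) = pvCeil 20 i :=
          pvCeil_eq_of 20 (i + 1) (pvCeil 20 i) (by norm_num) (by omega) (by omega) ha3
        have e2 : pvCeil 21 (i + 1) = pvCeil 21 i :=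
          pvCeil_eq_of 21 (i + 1) (pvCeil 21 i) (by norm_num) (by omega) (by omega) hb3
        rw [if_neg (by
          rintro (hc | hc)
          · exact d20 ((mod_dvd20 i).mp hc)
          · exact d21 ((mod_dvd21 i).mp hc))]
        rw [ih (g' + 1) (i + 1) end_ (by omega) (by rw [e1, e2]; omega), e1, e2]
    · rw [myGenA, if_neg h, myGenB_nil g _ _ end_ (by omega) (by omega)]

-- ===== VERDICT (by name: the statement is the Claim_ definition above) =====
theorem my_gen_2_spec : Claim_equal_my_gen_2 := by
  intro start end_ _
  unfold Spec_my_gen_2 my_gen_2 my_gen_2_alt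
  exact gen_eq (end_ + 1 - start).toNat _ start end_ le_rfl le_rfl
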